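-- pv_equiv track=rewrite | github.com/joshualangsam-a11y/digital-twin | engines/world_model.py | _calculate_timing
-- ===== SOURCE A (Python) =====
-- def _calculate_timing(trends: list) -> float:
--     score = 0
--     for trend in trends:
--         timing = trend.get("timing", "")
--         if "perfect" in timing or "now" in timing:
--             score += 3
--         elif "early" in timing or "strong" in timing:
--             score += 2
--         elif "good" in timing or "medium" in timing:
--             score += 1
--     return min(10, score)
-- ===== SOURCE B (Python) =====
-- def _calculate_timing(trends: list) -> float:
--     # Staged decomposition: extract all timings, then filter them into
--     # disjoint tiers by successive passes and return a weighted count sum.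
--     timings = [t.get("timing", "") for t in trends]
--     top = sum(1 for s in timings if "perfect" in s or "now" in s)
--     rest = [s for s in timings if not ("perfect" in s or "now" in s)]
--     mid = sum(1 for s in rest if "early" in s or "strong" in s)
--     low = sum(1 for s in rest
--               if not ("early" in s or "strong" in s)
--               and ("good" in s or "medium" in s))
--     return min(10, 3 * top + 2 * mid + low)
-- ===== Notes on version B (the rewrite author's own statement) =====
-- stated objective: alternative
-- what changed: Replaces A's single-pass accumulator loop with an if/elif cascade by staged passes: extract all timings, partition them into disjoint tiers by successive filters, and return the weighted sum of the tier counts (3*top + 2*mid + low) capped at 10.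
import Mathlib
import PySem

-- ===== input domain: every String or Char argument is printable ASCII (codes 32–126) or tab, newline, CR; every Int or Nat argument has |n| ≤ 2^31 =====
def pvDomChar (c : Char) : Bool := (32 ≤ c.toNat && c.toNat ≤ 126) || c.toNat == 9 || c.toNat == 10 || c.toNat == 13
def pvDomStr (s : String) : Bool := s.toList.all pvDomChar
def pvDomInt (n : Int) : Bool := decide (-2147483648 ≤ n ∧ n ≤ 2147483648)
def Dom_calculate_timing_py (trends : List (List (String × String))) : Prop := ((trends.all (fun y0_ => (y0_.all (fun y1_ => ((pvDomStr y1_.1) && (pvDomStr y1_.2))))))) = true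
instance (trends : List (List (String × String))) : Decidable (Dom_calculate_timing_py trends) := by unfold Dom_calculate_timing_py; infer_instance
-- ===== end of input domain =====

-- B replaces A's single accumulator loop by staged filter passes and a weighted count sum (alternative decomposition; same cost).

-- trend.get("timing", "") on an association list: first match, default ""
def pvGetTiming (trend : List (String × String)) : String :=
  ((trend.find? (fun p => p.1 == "timing")).map Prod.snd).getD ""

-- ===== PORT A =====
def calculate_timing_py (trends : List (List (String × String))) : Int :=
  let score : Int := trends.foldl (fun score trend =>
    let timing := pvGetTiming trend
    if PySem.Str.isIn "perfect" timing || PySem.Str.isIn "now" timing then score + 3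
    else if PySem.Str.isIn "early" timing || PySem.Str.isIn "strong" timing then score + 2
    else if PySem.Str.isIn "good" timing || PySem.Str.isIn "medium" timing then score + 1
    else score) 0
  min 10 score

-- ===== PORT B =====
def pvTop (s : String) : Bool := PySem.Str.isIn "perfect" s || PySem.Str.isIn "now" s
def pvMid (s : String) : Bool := PySem.Str.isIn "early" s || PySem.Str.isIn "strong" s
def pvLow (s : String) : Bool := PySem.Str.isIn "good" s || PySem.Str.isIn "medium" s

def calculate_timing_py_alt (trends : List (List (String × String))) : Int :=
  let timings := trends.map pvGetTiming
  let top := timings.countP pvTop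
  let rest := timings.filter (fun s => !pvTop s)
  let mid := rest.countP pvMid
  let low := rest.countP (fun s => !pvMid s && pvLow s)
  min 10 (3 * (top : Int) + 2 * (mid : Int) + (low : Int))

-- ===== PRECONDITION & SPEC =====
def Spec_calculate_timing_py (trends : List (List (String × String))) (out : Int) : Prop := out = calculate_timing_py_alt trends
instance (trends : List (List (String × String))) (out : Int) : Decidable (Spec_calculate_timing_py trends out) := by unfold Spec_calculate_timing_py; infer_instance

-- ===== CLAIM (what is proved, stated in full; the proofs are below) =====
def Claim_equal_calculate_timing_py : Prop := ∀ (trends : List (List (String × String))), Dom_calculate_timing_py trends → Spec_calculate_timing_py trends (calculate_timing_py trends)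

-- ===== LEMMAS AND PROOFS =====
-- B's score of a timing list, before the cap
def pvBsum (ts : List String) : Int :=
  3 * (ts.countP pvTop : Int)
  + 2 * (((ts.filter (fun s => !pvTop s)).countP pvMid) : Int)
  + ((((ts.filter (fun s => !pvTop s)).countP (fun s => !pvMid s && pvLow s))) : Int)

theorem pvBsum_cons (t : String) (ts : List String) :
    pvBsum (t :: ts)
      = (if pvTop t then 3 else if pvMid t then 2 else if pvLow t then 1 else 0) + pvBsum ts := by
  cases hT : pvTop t <;> cases hM : pvMid t <;> cases hL : pvLow t <;>
    simp [pvBsum, List.countP_cons, List.filter_cons, hT, hM, hL] <;> push_cast <;> ring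

theorem foldl_eq_bsum (l : List (List (String × String))) (s0 : Int) :
    l.foldl (fun score trend =>
      let timing := pvGetTiming trend
      if pvTop timing then score + 3
      else if pvMid timing then score + 2
      else if pvLow timing then score + 1
      else score) s0
    = s0 + pvBsum (l.map pvGetTiming) := by
  induction l generalizing s0 with
  | nil => simp [pvBsum]
  | cons hd tl ih =>
    simp only [List.foldl_cons, List.map_cons]
    rw [ih, pvBsum_cons]
    cases h1 : pvTop (pvGetTiming hd) <;> cases h2 : pvMid (pvGetTiming hd) <;>
      cases h3 : pvLow (pvGetTiming hd) <;> simp [h1, h2, h3] <;> ring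

-- ===== VERDICT (by name: the statement is the Claim_ definition above) =====
theorem calculate_timing_py_spec : Claim_equal_calculate_timing_py := by
  intro trends _
  unfold Spec_calculate_timing_py calculate_timing_py calculate_timing_py_alt
  exact congrArg (min 10) ((foldl_eq_bsum trends 0).trans (by simp [pvBsum]))
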